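-- pv_equiv track=rewrite | github.com/AndersSkoog/math_utils_collection | num_utils.py | solid_numbers
-- ===== SOURCE A (Python) =====
-- def solid_numbers(n_iter):
--     laterals_a = []
--     laterals_b = []
--     diagonals_a = []
--     diagonals_b = []
--     prev_s = 1
--     prev_d = 1
--     for i in range(1,n_iter):
--       s = prev_s + prev_d
--       d = prev_d + (prev_s * 2)
--       s2 = s ** 2
--       d2 = d ** 2
--       prev_s = s
--       prev_d = d
--       laterals_a.append(s)
--       laterals_b.append(s2)
--       diagonals_a.append(d)
--       diagonals_b.append(d2)
--     return [laterals_a,laterals_b,diagonals_a,diagonals_b]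
-- ===== SOURCE B (Python) =====
-- def solid_numbers(n_iter):
--     # Only the lateral sequence is generated by its recurrence; the diagonals are
--     # derived from consecutive laterals via the identity d_n = s_{n-1} + s_n,
--     # and the squares are produced by separate map passes.
--     m = max(n_iter - 1, 0)
--     lat = []
--     b, a = 0, 1
--     for _ in range(m):
--         b, a = a, 2 * a + b
--         lat.append(a)
--     diag = [x + y for x, y in zip([1] + lat, lat)]
--     return [lat, [x * x for x in lat], diag, [x * x for x in diag]]
-- ===== Notes on version B (the rewrite author's own statement) =====
-- stated objective: alternative
-- what changed: B runs only one recurrence (the laterals), derives the diagonals from consecutive laterals via the identity d_n = s_{n-1} + s_n with a zip, and produces the four lists in staged map passes instead of A's single loop appending to four accumulators from cross-coupled state.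
import Mathlib
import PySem

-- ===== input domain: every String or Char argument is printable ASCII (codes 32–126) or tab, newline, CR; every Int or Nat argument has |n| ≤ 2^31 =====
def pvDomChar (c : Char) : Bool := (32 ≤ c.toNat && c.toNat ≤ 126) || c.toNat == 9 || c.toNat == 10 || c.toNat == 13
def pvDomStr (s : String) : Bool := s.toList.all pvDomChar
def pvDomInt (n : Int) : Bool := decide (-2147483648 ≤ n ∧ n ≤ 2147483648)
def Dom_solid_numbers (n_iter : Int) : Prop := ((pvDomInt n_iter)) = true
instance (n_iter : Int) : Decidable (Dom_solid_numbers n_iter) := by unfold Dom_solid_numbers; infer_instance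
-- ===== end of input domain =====

-- B generates only the lateral sequence by its recurrence, derives diagonals by zipping consecutive laterals (d_n = s_{n-1} + s_n) and squares by map passes; alternative decomposition, same cost.


-- ===== PORT A =====
-- state: (prev_s, prev_d, laterals_a, laterals_b, diagonals_a, diagonals_b)
def solidStepA (st : Int × Int × List Int × List Int × List Int × List Int) (_ : Int) :
    Int × Int × List Int × List Int × List Int × List Int :=
  let (prev_s, prev_d, la, lb, da, db) := st
  let s := prev_s + prev_d
  let d := prev_d + (prev_s * 2)
  let s2 := s ^ 2
  let d2 := d ^ 2
  (s, d, la ++ [s], lb ++ [s2], da ++ [d], db ++ [d2])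

def solid_numbers (n_iter : Int) : List (List Int) :=
  let st := (PySem.List.pyRange 1 n_iter 1).foldl solidStepA (1, 1, [], [], [], [])
  [st.2.2.1, st.2.2.2.1, st.2.2.2.2.1, st.2.2.2.2.2]

-- ===== PORT B =====
-- Source B's loop: m iterations, state (b, a) and the accumulator lat
def pellLoopB (k : Nat) (b a : Int) (lat : List Int) : Int × Int × List Int :=
  match k with
  | 0 => (b, a, lat)
  | k + 1 => pellLoopB k a (2 * a + b) (lat ++ [2 * a + b])

def solid_numbers_alt (n_iter : Int) : List (List Int) :=
  let m := max (n_iter - 1) 0           -- m ≥ 0, so .toNat below is exact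
  let lat := (pellLoopB m.toNat 0 1 []).2.2
  let diag := List.zipWith (· + ·) (1 :: lat) lat
  [lat, lat.map (fun x => x * x), diag, diag.map (fun x => x * x)]

-- ===== PRECONDITION & SPEC =====
def Spec_solid_numbers (n_iter : Int) (out : List (List Int)) : Prop := out = solid_numbers_alt n_iter
instance (n_iter : Int) (out : List (List Int)) : Decidable (Spec_solid_numbers n_iter out) := by unfold Spec_solid_numbers; infer_instance

-- ===== CLAIM (what is proved, stated in full; the proofs are below) =====
def Claim_equal_solid_numbers : Prop := ∀ (n_iter : Int), Dom_solid_numbers n_iter → Spec_solid_numbers n_iter (solid_numbers n_iter)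

-- ===== LEMMAS AND PROOFS =====

-- A's fold ignores the range elements, so it only depends on the list length
def solidIterA (k : Nat) (st : Int × Int × List Int × List Int × List Int × List Int) :
    Int × Int × List Int × List Int × List Int × List Int :=
  match k with
  | 0 => st
  | k + 1 => solidIterA k (solidStepA st 0)

lemma foldl_solidStepA (l : List Int) (st : Int × Int × List Int × List Int × List Int × List Int) :
    l.foldl solidStepA st = solidIterA l.length st := by
  induction l generalizing st with
  | nil => rfl
  | cons x xs ih => simp [List.foldl, show solidStepA st x = solidStepA st 0 from rfl, ih, solidIterA]

-- the lateral terms produced from state (b, a), cons-style (for induction)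
def pellT (k : Nat) (b a : Int) : List Int :=
  match k with
  | 0 => []
  | k + 1 => (2 * a + b) :: pellT k a (2 * a + b)

lemma pellLoopB_acc (k : Nat) (b a : Int) (lat : List Int) :
    (pellLoopB k b a lat).2.2 = lat ++ pellT k b a := by
  induction k generalizing b a lat with
  | zero => simp [pellLoopB, pellT]
  | succ k ih => simp [pellLoopB, pellT, ih]

-- main invariant: A's state (prev_s, prev_d) = (a, a + b) emits exactly pellT k b a as
-- laterals and the zip of consecutive laterals as diagonals
lemma solidIterA_eq (k : Nat) : ∀ (a b : Int) (la lb da db : List Int),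
    (fun st => ((st.2.2.1, st.2.2.2.1, st.2.2.2.2.1, st.2.2.2.2.2) :
        List Int × List Int × List Int × List Int))
      (solidIterA k (a, a + b, la, lb, da, db))
    = (la ++ pellT k b a,
       lb ++ (pellT k b a).map (fun x => x * x),
       da ++ List.zipWith (· + ·) (pellT k b a) (a :: pellT k b a),
       db ++ (List.zipWith (· + ·) (pellT k b a) (a :: pellT k b a)).map (fun x => x * x)) := by
  induction k with
  | zero => intro a b la lb da db; simp [solidIterA, pellT]
  | succ k ih =>
      intro a b la lb da db
      have hs : a + (a + b) = 2 * a + b := by ring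
      have hd : (a + b) + a * 2 = (2 * a + b) + a := by ring
      simp only [solidIterA, solidStepA, pow_two]
      rw [hs, hd]
      have h := ih (2 * a + b) a (la ++ [2 * a + b])
        (lb ++ [(2 * a + b) * (2 * a + b)])
        (da ++ [(2 * a + b) + a]) (db ++ [((2 * a + b) + a) * ((2 * a + b) + a)])
      simp only at h
      rw [h]
      simp [pellT, List.append_assoc]

-- ===== VERDICT (by name: the statement is the Claim_ definition above) =====
theorem solid_numbers_spec : Claim_equal_solid_numbers := by
  intro n _
  unfold Spec_solid_numbers solid_numbers solid_numbers_alt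
  have hm : (max (n - 1) 0).toNat = (n - 1).toNat := by omega
  have h := solidIterA_eq (n - 1).toNat 1 0 [] [] [] []
  simp only [add_zero, List.nil_append, Prod.mk.injEq] at h
  obtain ⟨h1, h2, h3, h4⟩ := h
  have hz : ∀ (l l' : List Int), List.zipWith (· + ·) l l' = List.zipWith (· + ·) l' l :=
    fun l l' => List.zipWith_comm_of_comm (fun x y => Int.add_comm x y)
  simp only [foldl_solidStepA, PySem.List.length_pyRange_one, hm, pellLoopB_acc,
    List.nil_append, h1, h2, h3, h4, hz (pellT (n - 1).toNat 0 1)]
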